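-- pv_equiv track=rewrite | github.com/NestarZ/doo | Doo/tp01-a/tp01.py | format
-- ===== SOURCE A (Python) =====
-- def format(configuration):
--     _tab, _tr = configuration
--     _str = "c'est le tour {}".format(_tr)
--     _border = '{}*{}*'.format('\n', '-'*(len(_tab)//3+1))
--     for i, case in enumerate(_tab):
--         _str += _border + '\n|' if i % 3 == 0 else ''
--         _str += '{}|'.format(case if case else ' ')
--     return _str + _border
-- ===== SOURCE B (Python) =====
-- def format(configuration):
--     tab, tr = configuration
--     n = len(tab)
--     border = '\n*' + '-' * (n // 3 + 1) + '*'
--     parts = ["c'est le tour {}".format(tr)]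
--     i = 0
--     while i < n:
--         parts.append(border + '\n|' + ''.join('{}|'.format(c or ' ') for c in tab[i:i+3]))
--         i += 3
--     parts.append(border)
--     return ''.join(parts)
-- ===== Notes on version B (the rewrite author's own statement) =====
-- stated objective: alternative
-- what changed: A builds the string in one flat enumerate loop inserting the border whenever i%3==0; B peels the list into rows of three, formats each row as one part, and joins header, row parts and trailing border once.
import Mathlib
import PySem

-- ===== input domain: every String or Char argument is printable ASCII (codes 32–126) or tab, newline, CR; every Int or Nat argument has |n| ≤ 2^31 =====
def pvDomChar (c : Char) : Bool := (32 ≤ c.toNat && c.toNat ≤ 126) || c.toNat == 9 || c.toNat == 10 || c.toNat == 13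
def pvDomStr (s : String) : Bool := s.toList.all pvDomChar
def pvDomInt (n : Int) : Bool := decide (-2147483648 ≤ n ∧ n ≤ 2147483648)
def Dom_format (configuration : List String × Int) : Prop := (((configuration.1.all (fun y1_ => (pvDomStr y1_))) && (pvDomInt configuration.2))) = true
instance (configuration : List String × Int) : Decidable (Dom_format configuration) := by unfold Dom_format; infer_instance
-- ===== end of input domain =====

-- B replaces A's flat enumerate-loop with index arithmetic by consuming the grid in rows of
-- three and joining one string part per row (objective: alternative decomposition, same cost).

-- ===== PORT A =====
-- '-'*(len(_tab)//3+1): the count is a nonnegative Nat, so List.replicate is exact here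
def format (configuration : List String × Int) : String :=
  let _tab := configuration.1
  let _tr := configuration.2
  let _str := "c'est le tour " ++ PySem.Int.toStr _tr
  let _border := "\n" ++ "*" ++ String.ofList (List.replicate (_tab.length / 3 + 1) '-') ++ "*"
  let _str := (PySem.List.enumerate _tab 0).foldl (fun s p =>
    let s := if PySem.Int.mod p.1 3 == 0 then s ++ _border ++ "\n|" else s
    s ++ (if !(p.2 == "") then p.2 else " ") ++ "|") _str
  _str ++ _border

-- ===== PORT B =====
-- one formatted cell, '{}|'.format(c or ' ')
def pvCell (c : String) : String := (if !(c == "") then c else " ") ++ "|"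

-- the while loop of Source B: one row part per index step of three
def pvRowsIdx (border : String) (tab : List String) (i : Nat) : List String :=
  if i < tab.length then
    (border ++ "\n|" ++
        PySem.Str.join "" ((PySem.List.slice tab (some (i:Int)) (some ((i:Int)+3))).map pvCell))
      :: pvRowsIdx border tab (i+3)
  else []
termination_by tab.length - i
decreasing_by omega

def format_alt (configuration : List String × Int) : String :=
  let tab := configuration.1
  let tr := configuration.2
  let n := tab.length
  let border := "\n*" ++ String.ofList (List.replicate (n / 3 + 1) '-') ++ "*"
  PySem.Str.join ""
    (("c'est le tour " ++ PySem.Int.toStr tr) :: (pvRowsIdx border tab 0 ++ [border]))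

-- ===== PRECONDITION & SPEC =====
def Spec_format (configuration : List String × Int) (out : String) : Prop := out = format_alt configuration
instance (configuration : List String × Int) (out : String) : Decidable (Spec_format configuration out) := by unfold Spec_format; infer_instance

-- ===== CLAIM (what is proved, stated in full; the proofs are below) =====
def Claim_equal_format : Prop := ∀ (configuration : List String × Int), Dom_format configuration → Spec_format configuration (format configuration)

-- ===== LEMMAS AND PROOFS =====

-- proof-side view of B's loop: the same rows obtained by peeling the list's front
def pvChunk (border : String) : List String → List String
  | [] => []
  | x :: rest =>
      (border ++ "\n|" ++ PySem.Str.join "" ((x :: rest.take 2).map pvCell))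
        :: pvChunk border (rest.drop 2)
termination_by xs => xs.length
decreasing_by simp

lemma pvRows_nil (border : String) : pvChunk border [] = [] := by rw [pvChunk]

lemma pvRows_cons (border x : String) (rest : List String) :
    pvChunk border (x :: rest)
      = (border ++ "\n|" ++ PySem.Str.join "" ((x :: rest.take 2).map pvCell))
          :: pvChunk border (rest.drop 2) := by rw [pvChunk]

lemma pvChunk_step (border : String) (xs : List String) (h : xs ≠ []) :
    pvChunk border xs
      = (border ++ "\n|" ++ PySem.Str.join "" ((xs.take 3).map pvCell))
          :: pvChunk border (xs.drop 3) := by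
  match xs with
  | x :: rest =>
      rw [pvRows_cons]
      simp [List.take_succ_cons, List.drop_succ_cons]

lemma pvRowsIdx_eq_chunk (border : String) :
    ∀ (m : Nat) (tab : List String) (i : Nat), tab.length - i ≤ m →
      pvRowsIdx border tab i = pvChunk border (tab.drop i) := by
  intro m
  induction m with
  | zero =>
      intro tab i h
      rw [pvRowsIdx]
      have h1 : ¬ i < tab.length := by omega
      have h2 : List.drop i tab = [] := List.drop_eq_nil_of_le (by omega)
      simp [h1, h2, pvRows_nil]
  | succ m ih =>
      intro tab i h
      rw [pvRowsIdx]
      by_cases hi : i < tab.length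
      · have hne : tab.drop i ≠ [] := by
          intro hempty
          have := List.drop_eq_nil_iff.mp hempty
          omega
        rw [pvChunk_step border _ hne]
        simp only [hi, if_true]
        have hslice : PySem.List.slice tab (some (i:Int)) (some ((i:Int)+3))
            = (tab.drop i).take 3 := by
          have := PySem.List.slice_natCast tab i (i+3)
          push_cast at this
          simpa using this
        rw [hslice, ih tab (i+3) (by omega), List.drop_drop]
      · have h2 : List.drop i tab = [] := List.drop_eq_nil_of_le (by omega)
        simp [hi, h2, pvRows_nil]

lemma pv_intercalate_nil (l : List (List Char)) : [].intercalate l = l.flatten := by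
  induction l with
  | nil => simp [List.intercalate]
  | cons a t ih =>
      cases t with
      | nil => simp [List.intercalate]
      | cons b u =>
        simp [List.intercalate] at ih ⊢
        simpa using ih

lemma pv_cjoin (l : List (List Char)) : PySem.Chars.join [] l = l.flatten := by
  simp [PySem.Chars.join, pv_intercalate_nil]

lemma pv_mod3_0 (k : Int) : PySem.Int.mod (3*k) 3 = 0 := by
  simp [PySem.Int.mod, Int.fmod_eq_emod]

lemma pv_mod3_1 (k : Int) : PySem.Int.mod (3*k+1) 3 = 1 := by
  simp [PySem.Int.mod, Int.fmod_eq_emod]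

lemma pv_mod3_2 (k : Int) : PySem.Int.mod (3*k+1+1) 3 = 2 := by
  simp [PySem.Int.mod, Int.fmod_eq_emod]; omega

lemma pv_loop_eq (border : String) :
    ∀ (n : Nat) (xs : List String), xs.length ≤ n → ∀ (k : Int) (s : String),
    ((PySem.List.enumerate xs (3*k)).foldl (fun s p =>
        let s := if PySem.Int.mod p.1 3 == 0 then s ++ border ++ "\n|" else s
        s ++ (if !(p.2 == "") then p.2 else " ") ++ "|") s).toList
      = s.toList ++ ((pvChunk border xs).map String.toList).flatten := by
  intro n
  induction n with
  | zero =>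
      intro xs h k s
      have : xs = [] := List.length_eq_zero_iff.mp (Nat.le_zero.mp h)
      subst this
      simp [PySem.List.enumerate_nil, pvRows_nil]
  | succ n ih =>
      intro xs h k s
      match xs with
      | [] => simp [PySem.List.enumerate_nil, pvRows_nil]
      | [x] =>
          simp [PySem.List.enumerate_cons, PySem.List.enumerate_nil,
            pvRows_cons, pvRows_nil, pvCell, String.toList_append]
      | [x, y] =>
          simp [PySem.List.enumerate_cons, PySem.List.enumerate_nil,
            pvRows_cons, pvRows_nil, pvCell, pv_cjoin, String.toList_append]
      | x :: y :: z :: rest =>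
          have hk : (3*k+1+1+1 : Int) = 3*(k+1) := by ring
          have hlen : rest.length ≤ n := by simp at h; omega
          simp only [PySem.List.enumerate_cons, List.foldl_cons,
            pv_mod3_0, pv_mod3_1, pv_mod3_2, hk]
          rw [ih rest hlen (k+1)]
          simp [pvRows_cons, pvCell, pv_cjoin, String.toList_append]

-- ===== VERDICT (by name: the statement is the Claim_ definition above) =====
theorem format_spec : Claim_equal_format := by
  intro c _
  unfold Spec_format format format_alt
  apply String.toList_injective
  have hb : ("\n" ++ "*" ++ String.ofList (List.replicate (c.1.length / 3 + 1) '-') ++ "*" : String)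
      = ("\n*" ++ String.ofList (List.replicate (c.1.length / 3 + 1) '-') ++ "*" : String) := by
    apply String.toList_injective
    simp [String.toList_append]
  simp only [hb]
  have hloop := pv_loop_eq
    ("\n*" ++ String.ofList (List.replicate (c.1.length / 3 + 1) '-') ++ "*")
    c.1.length c.1 le_rfl 0 ("c'est le tour " ++ PySem.Int.toStr c.2)
  rw [show ((3:Int)*0) = 0 by ring] at hloop
  rw [String.toList_append, hloop,
    pvRowsIdx_eq_chunk _ c.1.length c.1 0 (by omega), List.drop_zero]
  simp [pv_cjoin, String.toList_append]
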